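-- pv_equiv track=rewrite | github.com/shahaansshah/Audiolab | Note.py | numToName
-- ===== SOURCE A (Python) =====
-- names = [   # assigns numbers to names to allow equation between names & numbers
--     ['B', 11],
--     ['A', 9],
--     ['G', 7],
--     ['F', 5],
--     ['E', 4],
--     ['D', 2],
--     ['C', 0],
--     ['#', 1],
--     ['b', -1]
-- ]
--
-- def numToName(num):
--     name, accid = None, None
--     num -= 12
--     octv = num//12
--     num -= octv*12
--     for pair in names:
--         if pair[1] <= num:
--             name = pair[0]
--             num -= pair[1]
--             break
--     if num == 1:
--         accid = '#'
--         num -= 1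
--     if num == 0:
--         name = name+(accid or '')+str(octv)
--     return name
-- ===== SOURCE B (Python) =====
-- NOTE_NAMES = ['C', 'C#', 'D', 'D#', 'E', 'F', 'F#', 'G', 'G#', 'A', 'A#', 'B']
--
-- def numToName(num):
--     shifted = num - 12
--     return NOTE_NAMES[shifted % 12] + str(shifted // 12)
-- ===== Notes on version B (the rewrite author's own statement) =====
-- stated objective: simpler
-- what changed: Replaces A's linear scan over [name, value] pairs with running subtraction and a separate accidental step by a single direct index into a precomputed chromatic note-name table plus floor div/mod.
import Mathlib
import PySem

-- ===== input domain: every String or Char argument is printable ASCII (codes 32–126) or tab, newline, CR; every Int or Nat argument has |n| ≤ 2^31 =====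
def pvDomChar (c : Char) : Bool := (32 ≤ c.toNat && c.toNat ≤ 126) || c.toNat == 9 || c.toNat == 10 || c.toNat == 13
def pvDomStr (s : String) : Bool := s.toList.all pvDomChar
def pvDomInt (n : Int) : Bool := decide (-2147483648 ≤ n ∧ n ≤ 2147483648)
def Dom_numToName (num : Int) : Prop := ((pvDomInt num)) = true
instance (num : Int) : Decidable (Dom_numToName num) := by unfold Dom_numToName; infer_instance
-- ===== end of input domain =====

-- ===== PORT A =====
-- literal port of A: the 'names' table and a scan taking the first pair with value ≤ num
def pvNames : List (String × Int) :=
  [("B", 11), ("A", 9), ("G", 7), ("F", 5), ("E", 4), ("D", 2), ("C", 0), ("#", 1), ("b", -1)]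

-- the for-loop with break: first pair with pair.2 ≤ num sets name and subtracts
def pvFindPair : List (String × Int) → Int → Option String × Int
  | [], num => (none, num)
  | (n, v) :: rest, num => if v ≤ num then (some n, num - v) else pvFindPair rest num

def numToName (num : Int) : Option String :=
  let n1 := num - 12
  let octv := PySem.Int.floordiv n1 12
  let n2 := n1 - octv * 12
  let p := pvFindPair pvNames n2
  let q := if p.2 = 1 then ((some "#" : Option String), p.2 - 1) else (none, p.2)
  if q.2 = 0 then
    -- Python does name + (accid or '') + str(octv); name = None here would raise TypeError,
    -- but that branch is unreachable for integer input (the scan always matches ('C', 0))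
    some ((p.1.getD "") ++ ((q.1).getD "") ++ PySem.Int.toStr octv)
  else p.1

-- ===== PORT B =====
def pvNoteNames : List String :=
  ["C", "C#", "D", "D#", "E", "F", "F#", "G", "G#", "A", "A#", "B"]

def numToName_alt (num : Int) : Option String :=
  let shifted := num - 12
  (PySem.List.pyGet? pvNoteNames (PySem.Int.mod shifted 12)).map
    (fun s => s ++ PySem.Int.toStr (PySem.Int.floordiv shifted 12))

-- ===== PRECONDITION & SPEC =====
def Spec_numToName (num : Int) (out : Option String) : Prop := out = numToName_alt num
instance (num : Int) (out : Option String) : Decidable (Spec_numToName num out) := by unfold Spec_numToName; infer_instance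

-- ===== CLAIM (what is proved, stated in full; the proofs are below) =====
def Claim_equal_numToName : Prop := ∀ (num : Int), Dom_numToName num → Spec_numToName num (numToName num)

-- ===== LEMMAS AND PROOFS =====
theorem pv_mod_sub (n1 : Int) :
    n1 - PySem.Int.floordiv n1 12 * 12 = PySem.Int.mod n1 12 := by
  have h := PySem.Int.floordiv_mul_add_mod n1 12
  omega

theorem pv_mod_bounds (n1 : Int) :
    0 ≤ PySem.Int.mod n1 12 ∧ PySem.Int.mod n1 12 < 12 := by
  have h : PySem.Int.mod n1 12 = n1 % 12 :=
    PySem.Int.mod_eq_emod_of_pos (by omega)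
  constructor <;> omega

theorem pv_case (r : Int) (o : Int) (h0 : 0 ≤ r) (h12 : r < 12) :
    (let p := pvFindPair pvNames r
     let q := if p.2 = 1 then ((some "#" : Option String), p.2 - 1) else (none, p.2)
     if q.2 = 0 then
       some ((p.1.getD "") ++ ((q.1).getD "") ++ PySem.Int.toStr o)
     else p.1)
    = (PySem.List.pyGet? pvNoteNames r).map (fun s => s ++ PySem.Int.toStr o) := by
  have hr : r = 0 ∨ r = 1 ∨ r = 2 ∨ r = 3 ∨ r = 4 ∨ r = 5 ∨ r = 6 ∨ r = 7 ∨
      r = 8 ∨ r = 9 ∨ r = 10 ∨ r = 11 := by omega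
  rcases hr with h | h | h | h | h | h | h | h | h | h | h | h <;> subst h <;>
    simp [pvFindPair, pvNames, pvNoteNames, PySem.List.pyGet?] <;> rfl

-- ===== VERDICT (by name: the statement is the Claim_ definition above) =====
theorem numToName_spec : Claim_equal_numToName := by
  intro num _
  unfold Spec_numToName numToName numToName_alt
  have hb := pv_mod_bounds (num - 12)
  simp only [pv_mod_sub (num - 12)]
  exact pv_case _ _ hb.1 hb.2
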